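-- pv_equiv track=rewrite | github.com/zhaoxy92/leetcode | dynamic-programing/638_shopping_offer.py | find_lowest_price
-- ===== SOURCE A (Python) =====
-- def find_lowest_price(price, special, needs):
--
--     # if tuple(needs) in dp:
--     #     return dp[tuple(needs)]
--
--     cost = 0
--     for i, need in enumerate(needs):
--         cost += need * price[i]
--
--     for offer in special:
--
--         for i, need in enumerate(needs):
--             if need < offer[i]:
--                 break
--         else:
--             new_needs = [need-offer[i] for i, need in enumerate(needs)]
--             cost = min(cost, offer[-1] + find_lowest_price(price, special, new_needs))
--
--     # dp[tuple(needs)] = cost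
--     return cost
-- ===== SOURCE B (Python) =====
-- def find_lowest_price(price, special, needs):
--     memo = {}
--
--     def solve(needs):
--         key = tuple(needs)
--         if key in memo:
--             return memo[key]
--         best = sum(n * p for n, p in zip(needs, price))
--         for offer in special:
--             if all(o <= n for n, o in zip(needs, offer)):
--                 rest = [n - o for n, o in zip(needs, offer)]
--                 best = min(best, offer[-1] + solve(rest))
--         memo[key] = best
--         return best
--
--     return solve(needs)
-- ===== Notes on version B (the rewrite author's own statement) =====
-- stated objective: alternative
-- what changed: B is a top-down dynamic-programming version: it memoizes the recursion on the needs vector in a dict keyed by tuple(needs), so each reachable needs-state is solved once per call instead of being re-explored along every offer path.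
-- outside the precondition, e.g. on find_lowest_price([1, 1], [[1, -1, 0]], [1, 0]): A returns 1, B returns 1; on find_lowest_price([1, 1], [[5]], [2, 3]): A returns 5, B returns 5
import Mathlib
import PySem

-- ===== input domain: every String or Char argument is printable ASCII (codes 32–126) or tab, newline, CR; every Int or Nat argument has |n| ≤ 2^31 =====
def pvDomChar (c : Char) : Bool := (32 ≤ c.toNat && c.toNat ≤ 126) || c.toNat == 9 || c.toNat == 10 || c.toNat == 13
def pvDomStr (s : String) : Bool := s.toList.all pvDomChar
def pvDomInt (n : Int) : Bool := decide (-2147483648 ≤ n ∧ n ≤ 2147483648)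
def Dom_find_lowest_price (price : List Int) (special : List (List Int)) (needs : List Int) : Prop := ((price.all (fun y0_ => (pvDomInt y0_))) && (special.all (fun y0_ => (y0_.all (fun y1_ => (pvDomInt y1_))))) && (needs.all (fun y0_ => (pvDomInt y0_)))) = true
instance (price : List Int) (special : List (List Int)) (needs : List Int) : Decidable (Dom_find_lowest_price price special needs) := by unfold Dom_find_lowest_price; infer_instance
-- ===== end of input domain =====

-- B memoizes A's recursion on the needs vector (top-down DP); equivalence of the return
-- values is proved on Pre_, the inputs where Python A returns (no IndexError, terminating).

-- ===== PORT A =====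
-- measure used only to make the Lean recursion total (a fuel-style guard): it strictly
-- decreases at every recursive call A actually performs on inputs satisfying Pre_.
def pvMu (k : List Int) : Nat := (k.map Int.toNat).sum

-- cost = 0; for i, need in enumerate(needs): cost += need * price[i]
-- (price[i] is in range under Pre_; the getD default 0 is never used there)
def pvBaseA (price k : List Int) : Int :=
  k.zipIdx.foldl (fun (c : Int) (p : Int × Nat) => c + p.1 * (price.getD p.2 0)) 0

-- the inner `for i, need in enumerate(needs): if need < offer[i]: break / else:` loop;
-- true = the loop completed (the else-branch runs)
def pvCanBuyA (offer : List Int) : List Int → Nat → Bool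
  | [], _ => true
  | need :: rest, i => if need < offer.getD i 0 then false else pvCanBuyA offer rest (i + 1)

-- new_needs = [need - offer[i] for i, need in enumerate(needs)]
def pvNewA (offer k : List Int) : List Int :=
  k.zipIdx.map (fun p => p.1 - offer.getD p.2 0)

-- the `for offer in special:` loop of A, carrying `cost`; the full recursive call
-- find_lowest_price(price, special, new_needs) is the `offers := special` call
def pvGoA (price : List Int) (special : List (List Int)) :
    List (List Int) → List Int → Int → Int
  | [], _, cost => cost
  | offer :: rest, k, cost =>
    if pvCanBuyA offer k 0 then
      let nn := pvNewA offer k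
      -- the dite guard only makes the recursion total; it holds at every call made from Pre_
      let sub := if _h : pvMu nn < pvMu k then pvGoA price special special nn (pvBaseA price nn) else 0
      pvGoA price special rest k (min cost ((offer.getLast?).getD 0 + sub))
    else
      pvGoA price special rest k cost
  termination_by offers k _ => (pvMu k, offers.length)

def find_lowest_price (price : List Int) (special : List (List Int)) (needs : List Int) : Int :=
  pvGoA price special special needs (pvBaseA price needs)

-- ===== PORT B =====
-- best = sum(n * p for n, p in zip(needs, price))
def pvBaseB (price k : List Int) : Int :=
  (k.zip price).foldl (fun (c : Int) (p : Int × Int) => c + p.1 * p.2) 0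

-- all(o <= n for n, o in zip(needs, offer))
def pvCanBuyB (offer k : List Int) : Bool :=
  (k.zip offer).all (fun p => p.2 ≤ p.1)

-- rest = [n - o for n, o in zip(needs, offer)]
def pvNewB (offer k : List Int) : List Int :=
  (k.zip offer).map (fun p => p.1 - p.2)

-- B's `solve` (memo lookup / store) and its `for offer in special:` loop, threading the memo dict
mutual
def pvSolveB (price : List Int) (special : List (List Int)) (k : List Int)
    (memo : PySem.Dict (List Int) Int) : Int × PySem.Dict (List Int) Int :=
  match memo.get? k with
  | some v => (v, memo)
  | none =>
    let r := pvGoB price special special k (pvBaseB price k) memo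
    (r.1, r.2.insert k r.1)
  termination_by (pvMu k, special.length + 1)

def pvGoB (price : List Int) (special : List (List Int)) :
    List (List Int) → List Int → Int → PySem.Dict (List Int) Int → Int × PySem.Dict (List Int) Int
  | [], _, best, memo => (best, memo)
  | offer :: rest, k, best, memo =>
    if pvCanBuyB offer k then
      let nn := pvNewB offer k
      -- same totality guard as in A's port; it holds at every call made from Pre_
      let s := if _h : pvMu nn < pvMu k then pvSolveB price special nn memo else (0, memo)
      pvGoB price special rest k (min best ((offer.getLast?).getD 0 + s.1)) s.2
    else
      pvGoB price special rest k best memo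
  termination_by offers k _ _ => (pvMu k, offers.length)
end

def find_lowest_price_alt (price : List Int) (special : List (List Int)) (needs : List Int) : Int :=
  (pvSolveB price special needs PySem.Dict.empty).1

-- ===== PRECONDITION & SPEC =====
-- Pre_ = a closed-form sufficient condition for Python A to return: price and every offer
-- at least as long as needs (ruling out IndexError), and every offer either inapplicable
-- to the initial needs or with a nonnegative, not all-zero quantity prefix (ruling out
-- infinite recursion).  It is conservative: it also excludes some inputs on which A
-- happens to return — offers shorter than needs whose scan breaks early, and
-- negative-quantity offers whose recursion happens to stop (cited in the claim).
def Pre_find_lowest_price (price : List Int) (special : List (List Int)) (needs : List Int) : Prop :=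
  needs.length ≤ price.length ∧
  ∀ offer ∈ special, needs.length ≤ offer.length ∧
    ((∃ i < needs.length, needs.getD i 0 < offer.getD i 0) ∨
     ((∀ i < needs.length, 0 ≤ offer.getD i 0) ∧ (∃ i < needs.length, 0 < offer.getD i 0)))
instance (price : List Int) (special : List (List Int)) (needs : List Int) : Decidable (Pre_find_lowest_price price special needs) := by unfold Pre_find_lowest_price; infer_instance

def pvWitness_find_lowest_price : List Int × List (List Int) × List Int :=
  ([2, 5], [[3, 0, 5], [1, 2, 10]], [3, 2])

def Spec_find_lowest_price (price : List Int) (special : List (List Int)) (needs : List Int) (out : Int) : Prop := out = find_lowest_price_alt price special needs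
instance (price : List Int) (special : List (List Int)) (needs : List Int) (out : Int) : Decidable (Spec_find_lowest_price price special needs out) := by unfold Spec_find_lowest_price; infer_instance

-- ===== CLAIM (what is proved, stated in full; the proofs are below) =====
def Claim_equal_find_lowest_price : Prop := ∀ (price : List Int) (special : List (List Int)) (needs : List Int), Dom_find_lowest_price price special needs → Pre_find_lowest_price price special needs → Spec_find_lowest_price price special needs (find_lowest_price price special needs)

-- ===== LEMMAS AND PROOFS =====

theorem pv_base_bridge : ∀ (k : List Int) (l : List Int) (i : Nat) (c : Int),
    k.length + i ≤ l.length →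
    (k.zipIdx i).foldl (fun (c : Int) (p : Int × Nat) => c + p.1 * (l.getD p.2 0)) c
      = (k.zip (l.drop i)).foldl (fun (c : Int) (p : Int × Int) => c + p.1 * p.2) c := by
  intro k
  induction k with
  | nil => intro l i c h; simp
  | cons a k ih =>
    intro l i c h
    have hi : i < l.length := by simp at h; omega
    have hd : l.drop i = l[i] :: l.drop (i + 1) := List.drop_eq_getElem_cons hi
    have hg : l.getD i 0 = l[i] := List.getD_eq_getElem l 0 hi
    simp only [List.zipIdx_cons, List.foldl_cons, hd, List.zip_cons_cons, hg]
    exact ih l (i + 1) (c + a * l[i]) (by simp at h ⊢; omega)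

theorem pv_canBuy_bridge : ∀ (k : List Int) (l : List Int) (i : Nat),
    k.length + i ≤ l.length →
    pvCanBuyA l k i = (k.zip (l.drop i)).all (fun p => p.2 ≤ p.1) := by
  intro k
  induction k with
  | nil => intro l i h; simp [pvCanBuyA]
  | cons a k ih =>
    intro l i h
    have hi : i < l.length := by simp at h; omega
    have hd : List.drop i l = l[i] :: List.drop (i + 1) l := List.drop_eq_getElem_cons hi
    have hg : l.getD i 0 = l[i] := List.getD_eq_getElem l 0 hi
    simp only [pvCanBuyA, hd, List.zip_cons_cons, List.all_cons, hg]
    by_cases hc : a < l[i]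
    · simp [hc, Int.not_le.mpr hc]
    · simp only [if_neg hc]
      rw [ih l (i + 1) (by simp at h ⊢; omega)]
      simp [Int.not_lt.mp hc]

theorem pv_new_bridge : ∀ (k : List Int) (l : List Int) (i : Nat),
    k.length + i ≤ l.length →
    (k.zipIdx i).map (fun p => p.1 - l.getD p.2 0) = (k.zip (l.drop i)).map (fun p => p.1 - p.2) := by
  intro k
  induction k with
  | nil => intro l i h; simp
  | cons a k ih =>
    intro l i h
    have hi : i < l.length := by simp at h; omega
    have hd : List.drop i l = l[i] :: List.drop (i + 1) l := List.drop_eq_getElem_cons hi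
    have hg : l.getD i 0 = l[i] := List.getD_eq_getElem l 0 hi
    simp only [List.zipIdx_cons, List.map_cons, hd, List.zip_cons_cons, hg]
    rw [ih l (i + 1) (by simp at h ⊢; omega)]

theorem pv_baseA_eq (price k : List Int) (h : k.length ≤ price.length) :
    pvBaseA price k = pvBaseB price k := by
  have := pv_base_bridge k price 0 0 (by omega)
  simpa [pvBaseA, pvBaseB] using this

theorem pv_canBuy_eq (offer k : List Int) (h : k.length ≤ offer.length) :
    pvCanBuyA offer k 0 = pvCanBuyB offer k := by
  have := pv_canBuy_bridge k offer 0 (by omega)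
  simpa [pvCanBuyB] using this

theorem pv_new_eq (offer k : List Int) (h : k.length ≤ offer.length) :
    pvNewA offer k = pvNewB offer k := by
  have := pv_new_bridge k offer 0 (by omega)
  simpa [pvNewA, pvNewB] using this

theorem pv_newB_length (offer k : List Int) (h : k.length ≤ offer.length) :
    (pvNewB offer k).length = k.length := by
  simp [pvNewB]; omega

-- memo invariant: every cached value is A's value at that key
def pvMemoOK (price : List Int) (special : List (List Int)) (memo : PySem.Dict (List Int) Int) : Prop :=
  ∀ k v, memo.get? k = some v → v = find_lowest_price price special k

theorem pv_main : ∀ (m : Nat) (price : List Int) (special : List (List Int)) (k : List Int),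
    pvMu k = m →
    k.length ≤ price.length → (∀ o ∈ special, k.length ≤ o.length) →
    ∀ (offers : List (List Int)), (∀ o ∈ offers, k.length ≤ o.length) →
    ∀ (cost : Int) (memo : PySem.Dict (List Int) Int), pvMemoOK price special memo →
      (pvGoB price special offers k cost memo).1 = pvGoA price special offers k cost ∧
      pvMemoOK price special (pvGoB price special offers k cost memo).2 := by
  intro m
  induction m using Nat.strong_induction_on with
  | _ m IH =>
    intro price special k hm hkp hks offers
    induction offers with
    | nil =>
      intro _ cost memo hmemo
      constructor
      · simp [pvGoB, pvGoA]
      · simpa [pvGoB] using hmemo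
    | cons offer rest ihr =>
      intro ho cost memo hmemo
      have hoff : k.length ≤ offer.length := ho offer (by simp)
      have horest : ∀ o ∈ rest, k.length ≤ o.length := fun o h => ho o (by simp [h])
      have hcb : pvCanBuyB offer k = pvCanBuyA offer k 0 := (pv_canBuy_eq offer k hoff).symm
      by_cases hb : pvCanBuyA offer k 0 = true
      · -- offer applicable
        have hnn : pvNewA offer k = pvNewB offer k := pv_new_eq offer k hoff
        have hlen : (pvNewB offer k).length = k.length := pv_newB_length offer k hoff
        by_cases hg : pvMu (pvNewB offer k) < pvMu k
        · -- guard true: B consults/extends the memo, A recurses in full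
          have hsolve : (pvSolveB price special (pvNewB offer k) memo).1
                = find_lowest_price price special (pvNewB offer k) ∧
              pvMemoOK price special (pvSolveB price special (pvNewB offer k) memo).2 := by
            rw [pvSolveB]
            cases hmget : memo.get? (pvNewB offer k) with
            | some v => exact ⟨hmemo _ _ hmget, by simpa [hmget] using hmemo⟩
            | none =>
              have hrec := IH (pvMu (pvNewB offer k)) (hm ▸ hg) price special (pvNewB offer k)
                rfl (hlen ▸ hkp) (fun o h => hlen ▸ hks o h) special (fun o h => hlen ▸ hks o h)
                (pvBaseB price (pvNewB offer k)) memo hmemo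
              have hval : (pvGoB price special special (pvNewB offer k)
                  (pvBaseB price (pvNewB offer k)) memo).1
                  = find_lowest_price price special (pvNewB offer k) := by
                rw [hrec.1, find_lowest_price, pv_baseA_eq price _ (hlen ▸ hkp)]
              refine ⟨by simpa [hmget] using hval, ?_⟩
              intro k' v' hk'
              rw [PySem.Dict.get?_insert] at hk'
              by_cases hkk : k' = pvNewB offer k
              · subst hkk
                rw [if_pos rfl, Option.some.injEq] at hk'
                rw [← hk', hval]
              · rw [if_neg hkk] at hk'
                exact hrec.2 k' v' hk'
          have hA : pvGoA price special (offer :: rest) k cost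
              = pvGoA price special rest k
                (min cost ((offer.getLast?).getD 0 + find_lowest_price price special (pvNewB offer k))) := by
            rw [pvGoA]
            simp only [if_pos hb, hnn, dif_pos hg, find_lowest_price,
              pv_baseA_eq price _ (hlen ▸ hkp)]
          have hB : pvGoB price special (offer :: rest) k cost memo
              = pvGoB price special rest k
                (min cost ((offer.getLast?).getD 0 + find_lowest_price price special (pvNewB offer k)))
                (pvSolveB price special (pvNewB offer k) memo).2 := by
            rw [pvGoB]
            simp only [hcb, if_pos hb, dif_pos hg, hsolve.1]
          rw [hA, hB]
          exact ihr horest _ _ hsolve.2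
        · -- guard false (unreachable from Pre_): both sides add 0
          have hA : pvGoA price special (offer :: rest) k cost
              = pvGoA price special rest k (min cost ((offer.getLast?).getD 0 + 0)) := by
            rw [pvGoA]; simp only [if_pos hb, hnn, dif_neg hg]
          have hB : pvGoB price special (offer :: rest) k cost memo
              = pvGoB price special rest k (min cost ((offer.getLast?).getD 0 + 0)) memo := by
            rw [pvGoB]; simp only [hcb, if_pos hb, dif_neg hg]
          rw [hA, hB]
          exact ihr horest _ _ hmemo
      · -- offer not applicable
        have hA : pvGoA price special (offer :: rest) k cost = pvGoA price special rest k cost := by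
          rw [pvGoA]; simp only [if_neg hb]
        have hB : pvGoB price special (offer :: rest) k cost memo
            = pvGoB price special rest k cost memo := by
          rw [pvGoB]; simp only [hcb, if_neg hb]
        rw [hA, hB]
        exact ihr horest _ _ hmemo

-- ===== VERDICT (by name: the statement is the Claim_ definition above) =====
theorem find_lowest_price_spec : Claim_equal_find_lowest_price := by
  intro price special needs _hdom hpre
  obtain ⟨hp, hs⟩ := hpre
  have hlens : ∀ o ∈ special, needs.length ≤ o.length := fun o h => (hs o h).1
  have hempty : pvMemoOK price special PySem.Dict.empty := by
    intro k v h
    simp [PySem.Dict.get?_empty] at h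
  have hmain := pv_main (pvMu needs) price special needs rfl hp hlens special hlens
    (pvBaseB price needs) PySem.Dict.empty hempty
  unfold Spec_find_lowest_price find_lowest_price_alt
  rw [pvSolveB]
  simp only [PySem.Dict.get?_empty]
  rw [hmain.1, find_lowest_price, pv_baseA_eq price needs hp]
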